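-- pv_equiv track=rewrite | github.com/stephenxie990-blip/invest-evolution | invest/shared/model_governance.py | normalize_strategy_family_name
-- ===== SOURCE A (Python) =====
-- from typing import Any
--
-- DEFAULT_STRATEGY_FAMILY_REGIME_HARD_FAIL_PROFILES: dict[str, dict[str, Any]] = {
--     "momentum": {
--         "critical_regimes": ["bull", "bear"],
--         "min_cycles": 2,
--         "per_regime": {
--             "bull": {
--                 "min_avg_return_pct": -0.10,
--                 "max_benchmark_pass_rate": 0.25,
--                 "max_win_rate": 0.45,
--             },
--             "bear": {
--                 "min_avg_return_pct": -0.40,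
--                 "max_benchmark_pass_rate": 0.25,
--                 "max_win_rate": 0.40,
--             },
--         },
--     },
--     "mean_reversion": {
--         "critical_regimes": ["oscillation", "bear"],
--         "min_cycles": 2,
--         "per_regime": {
--             "oscillation": {
--                 "min_avg_return_pct": -0.20,
--                 "max_benchmark_pass_rate": 0.25,
--                 "max_win_rate": 0.40,
--             },
--             "bear": {
--                 "min_avg_return_pct": -0.50,
--                 "max_benchmark_pass_rate": 0.20,
--                 "max_win_rate": 0.35,
--             },
--         },
--     },
--     "defensive_low_vol": {
--         "critical_regimes": ["bear", "oscillation"],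
--         "min_cycles": 2,
--         "per_regime": {
--             "bear": {
--                 "min_avg_return_pct": -0.15,
--                 "max_benchmark_pass_rate": 0.30,
--                 "max_win_rate": 0.45,
--             },
--             "oscillation": {
--                 "min_avg_return_pct": -0.25,
--                 "max_benchmark_pass_rate": 0.25,
--                 "max_win_rate": 0.40,
--             },
--         },
--     },
--     "value_quality": {
--         "critical_regimes": ["bear", "oscillation"],
--         "min_cycles": 2,
--         "per_regime": {
--             "bear": {
--                 "min_avg_return_pct": -0.35,
--                 "max_benchmark_pass_rate": 0.25,
--                 "max_win_rate": 0.40,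
--             },
--             "oscillation": {
--                 "min_cycles": 3,
--                 "min_avg_return_pct": -0.20,
--                 "max_benchmark_pass_rate": 0.15,
--                 "max_win_rate": 0.35,
--                 "max_loss_share": 0.65,
--                 "min_negative_contribution_pct": -4.0,
--                 "required_failed_metrics": [
--                     "avg_return_pct",
--                     "loss_share",
--                     "negative_contribution_pct",
--                 ],
--                 "confirm_any_failed_metrics": [
--                     "benchmark_pass_rate",
--                     "win_rate",
--                 ],
--             },
--         },
--     },
-- }
--
-- def normalize_strategy_family_name(value: Any) -> str:
--     normalized = str(value or "").strip().lower()
--     if not normalized: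
--         return ""
--     if normalized in DEFAULT_STRATEGY_FAMILY_REGIME_HARD_FAIL_PROFILES:
--         return normalized
--     for family in DEFAULT_STRATEGY_FAMILY_REGIME_HARD_FAIL_PROFILES:
--         if normalized.startswith(f"{family}_") or normalized.startswith(f"{family}-"):
--             return family
--     return normalized
-- ===== SOURCE B (Python) =====
-- # B: instead of prefix-testing each known family, scan the separator positions of the
-- # normalized name once and look the preceding prefix up in the key set (objective: alternative).
-- _KNOWN_FAMILIES = frozenset({
--     "momentum",
--     "mean_reversion",
--     "defensive_low_vol",
--     "value_quality",
-- })
--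
--
-- def normalize_strategy_family_name(value):
--     normalized = str(value or "").strip().lower()
--     if not normalized:
--         return ""
--     if normalized in _KNOWN_FAMILIES:
--         return normalized
--     for i, ch in enumerate(normalized):
--         if ch == "_" or ch == "-":
--             prefix = normalized[:i]
--             if prefix in _KNOWN_FAMILIES:
--                 return prefix
--     return normalized
-- ===== Notes on version B (the rewrite author's own statement) =====
-- stated objective: alternative
-- what changed: Instead of testing the input against each of the four family names with startswith, B scans the separator ('_'/'-') positions of the normalized string once and looks the prefix before each separator up in the key set, relying on no family being a separator-extension of another.
import Mathlib
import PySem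

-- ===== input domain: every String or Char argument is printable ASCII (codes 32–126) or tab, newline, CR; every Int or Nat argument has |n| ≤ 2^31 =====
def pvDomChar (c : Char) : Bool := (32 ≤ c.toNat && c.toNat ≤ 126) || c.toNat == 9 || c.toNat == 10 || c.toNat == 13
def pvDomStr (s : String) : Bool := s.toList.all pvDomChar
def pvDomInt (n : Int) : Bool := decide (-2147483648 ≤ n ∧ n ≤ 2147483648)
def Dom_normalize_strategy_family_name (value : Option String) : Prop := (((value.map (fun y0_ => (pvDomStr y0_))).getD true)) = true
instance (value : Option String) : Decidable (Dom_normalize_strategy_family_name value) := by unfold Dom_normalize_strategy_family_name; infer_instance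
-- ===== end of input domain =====

-- B replaces A's per-family startswith loop by a single scan over the separator positions of the
-- normalized name with a set lookup of the prefix before each separator (objective: alternative).

-- ===== PORT A =====
-- The profile dict's values are never read by this function (they hold float thresholds), so both
-- ports carry only its keys, in insertion order.
def pvFamilies : List String := ["momentum", "mean_reversion", "defensive_low_vol", "value_quality"]

def normalize_strategy_family_name (value : Option String) : String :=
  let normalized := PySem.Str.lower (PySem.Str.strip (value.getD ""))
  if normalized = "" then ""
  else if pvFamilies.contains normalized then normalized
  else
    match pvFamilies.find? (fun f =>
        PySem.Str.startswith normalized (f ++ "_") || PySem.Str.startswith normalized (f ++ "-")) with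
    | some f => f
    | none => normalized

-- ===== PORT B =====
-- the key set of Source B's _KNOWN_FAMILIES, kept as lists of chars (string facts live on the list side)
def pvFamiliesL : List (List Char) := pvFamilies.map String.toList

-- Source B's `for i, ch in enumerate(normalized)` loop, as recursion on the index
def pvAltScan (n : List Char) (i : Nat) : String :=
  if h : i < n.length then
    if (n[i] == '_' || n[i] == '-') && pvFamiliesL.contains (n.take i) then
      String.ofList (n.take i)
    else pvAltScan n (i + 1)
  else String.ofList n
termination_by n.length - i

def normalize_strategy_family_name_alt (value : Option String) : String :=
  let normalized := PySem.Str.lower (PySem.Str.strip (value.getD ""))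
  if normalized = "" then ""
  else if pvFamilies.contains normalized then normalized
  else pvAltScan normalized.toList 0

-- ===== PRECONDITION & SPEC =====
def Spec_normalize_strategy_family_name (value : Option String) (out : String) : Prop := out = normalize_strategy_family_name_alt value
instance (value : Option String) (out : String) : Decidable (Spec_normalize_strategy_family_name value out) := by unfold Spec_normalize_strategy_family_name; infer_instance

-- ===== CLAIM (what is proved, stated in full; the proofs are below) =====
def Claim_equal_normalize_strategy_family_name : Prop := ∀ (value : Option String), Dom_normalize_strategy_family_name value → Spec_normalize_strategy_family_name value (normalize_strategy_family_name value)

-- ===== LEMMAS AND PROOFS =====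

-- "n starts with family f followed by a separator" — the condition A's loop tests for family f
def pvPp (n f : List Char) : Prop := (f ++ ['_']) <+: n ∨ (f ++ ['-']) <+: n

lemma pvPp_take {n f : List Char} (h : pvPp n f) :
    n.take f.length = f ∧ ∃ hl : f.length < n.length, (n[f.length]'hl = '_' ∨ n[f.length]'hl = '-') := by
  rcases h with ⟨t, ht⟩ | ⟨t, ht⟩ <;>
  · subst ht
    refine ⟨?_, ⟨by simp, ?_⟩⟩
    · rw [List.append_assoc]; exact List.take_left
    · simp [List.getElem_append_right]

lemma pvHit_Pp {n : List Char} {i : Nat} (hi : i < n.length)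
    (hs : n[i] = '_' ∨ n[i] = '-') : pvPp n (n.take i) := by
  have hconc : n.take i ++ [n[i]] = n.take (i + 1) := by
    rw [← List.concat_eq_append]
    exact List.take_concat_get hi
  rcases hs with hs | hs <;> [left; right] <;>
  · rw [← hs, hconc]; exact List.take_prefix _ _

-- the four family names have pairwise distinct lengths …
lemma pvFam_len : ∀ f ∈ pvFamiliesL, ∀ g ∈ pvFamiliesL, f ≠ g → f.length ≠ g.length := by decide

-- … and none is a separator-extension of another
lemma pvFam_nosep : ∀ f ∈ pvFamiliesL, ∀ g ∈ pvFamiliesL, f.length < g.length →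
    ¬(g.take f.length = f ∧ (g.getD f.length ' ' = '_' ∨ g.getD f.length ' ' = '-')) := by decide

lemma pvFam_unique_aux {n f g : List Char} (hf : f ∈ pvFamiliesL) (hg : g ∈ pvFamiliesL)
    (hpf : pvPp n f) (hpg : pvPp n g) (hlt : f.length < g.length) : False := by
  obtain ⟨htf, hlf, hsf⟩ := pvPp_take hpf
  obtain ⟨htg, hlg, hsg⟩ := pvPp_take hpg
  apply pvFam_nosep f hf g hg hlt
  constructor
  · rw [← htg, List.take_take, Nat.min_eq_left (Nat.le_of_lt hlt), htf]
  · have h2 : g.getD f.length ' ' = n.getD f.length ' ' := by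
      rw [← htg, List.getD_eq_getElem?_getD, List.getD_eq_getElem?_getD]
      congr 1
      simp [hlt]
    rw [h2, List.getD_eq_getElem n ' ' hlf]
    exact hsf

-- at most one family satisfies A's condition on a given n
lemma pvFam_unique {n f g : List Char} (hf : f ∈ pvFamiliesL) (hg : g ∈ pvFamiliesL)
    (hpf : pvPp n f) (hpg : pvPp n g) : f = g := by
  by_contra hne
  rcases Nat.lt_or_ge f.length g.length with h | h
  · exact pvFam_unique_aux hf hg hpf hpg h
  · rcases Nat.lt_or_eq_of_le h with h | h
    · exact pvFam_unique_aux hg hf hpg hpf h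
    · exact pvFam_len g hg f hf (Ne.symm hne) h

-- if no family matches, the scan falls through and returns the whole string
lemma pvScan_none (n : List Char) (h : ∀ f ∈ pvFamiliesL, ¬ pvPp n f) (i : Nat) :
    pvAltScan n i = String.ofList n := by
  rw [pvAltScan]
  split
  · next hi =>
    have hcond : ((n[i] == '_' || n[i] == '-') && pvFamiliesL.contains (n.take i)) = false := by
      by_contra hc
      rw [Bool.not_eq_false, Bool.and_eq_true, Bool.or_eq_true, beq_iff_eq, beq_iff_eq,
        List.contains_iff_mem] at hc
      exact h _ hc.2 (pvHit_Pp hi hc.1)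
    simp only [hcond, Bool.false_eq_true, if_false]
    exact pvScan_none n h (i + 1)
  · rfl
termination_by n.length - i

-- if the (unique) family f matches, the scan started at any i ≤ |f| returns f
lemma pvScan_hit (n f : List Char) (hf : f ∈ pvFamiliesL) (hp : pvPp n f) (i : Nat)
    (hile : i ≤ f.length) : pvAltScan n i = String.ofList f := by
  obtain ⟨htake, hlf, hsep⟩ := pvPp_take hp
  rw [pvAltScan]
  have hi : i < n.length := by omega
  rw [dif_pos hi]
  rcases Nat.lt_or_eq_of_le hile with hlt | heq
  · have hcond : ((n[i] == '_' || n[i] == '-') && pvFamiliesL.contains (n.take i)) = false := by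
      by_contra hc
      rw [Bool.not_eq_false, Bool.and_eq_true, Bool.or_eq_true, beq_iff_eq, beq_iff_eq,
        List.contains_iff_mem] at hc
      have huniq := pvFam_unique hc.2 hf (pvHit_Pp hi hc.1) hp
      have hlen : (n.take i).length = i := by simp; omega
      rw [huniq] at hlen; omega
    simp only [hcond, Bool.false_eq_true, if_false]
    exact pvScan_hit n f hf hp (i + 1) hlt
  · subst heq
    have hcond : ((n[f.length]'hi == '_' || n[f.length]'hi == '-') &&
        pvFamiliesL.contains (n.take f.length)) = true := by
      rw [Bool.and_eq_true, Bool.or_eq_true, beq_iff_eq, beq_iff_eq, List.contains_iff_mem]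
      exact ⟨hsep, by rw [htake]; exact hf⟩
    rw [if_pos hcond, htake]
termination_by n.length - i

-- the core equivalence: A's find? over the families equals B's separator scan
lemma pvCore (s : String) :
    (match pvFamilies.find? (fun f =>
        PySem.Str.startswith s (f ++ "_") || PySem.Str.startswith s (f ++ "-")) with
     | some f => f
     | none => s) = pvAltScan s.toList 0 := by
  have hpred : ∀ f : String,
      ((PySem.Str.startswith s (f ++ "_") || PySem.Str.startswith s (f ++ "-")) = true)
        ↔ pvPp s.toList f.toList := by
    intro f
    simp [pvPp, PySem.Chars.startswith_iff]
  by_cases hex : ∃ f ∈ pvFamiliesL, pvPp s.toList f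
  · obtain ⟨f, hfmem, hfP⟩ := hex
    have hscan := pvScan_hit s.toList f hfmem hfP 0 (Nat.zero_le _)
    have hfalse : ∀ g : String, g.toList ∈ pvFamiliesL → g.toList ≠ f →
        ¬ ((PySem.Str.startswith s (g ++ "_") || PySem.Str.startswith s (g ++ "-")) = true) :=
      fun g hg hne hp => hne (pvFam_unique hg hfmem ((hpred g).mp hp) hfP)
    rw [hscan]
    have hmem := hfmem
    simp only [pvFamiliesL, pvFamilies, List.map_cons, List.map_nil, List.mem_cons,
      List.not_mem_nil, or_false] at hmem
    rcases hmem with h | h | h | h <;> subst h <;> simp only [pvFamilies]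
    · rw [List.find?_cons_of_pos (p := fun f => PySem.Str.startswith s (f ++ "_") || PySem.Str.startswith s (f ++ "-")) ((hpred "momentum").mpr hfP)]
      exact (by decide : "momentum" = String.ofList "momentum".toList)
    · rw [List.find?_cons_of_neg (p := fun f => PySem.Str.startswith s (f ++ "_") || PySem.Str.startswith s (f ++ "-")) (hfalse "momentum" (by decide) (by decide)),
        List.find?_cons_of_pos (p := fun f => PySem.Str.startswith s (f ++ "_") || PySem.Str.startswith s (f ++ "-")) ((hpred "mean_reversion").mpr hfP)]
      exact (by decide : "mean_reversion" = String.ofList "mean_reversion".toList)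
    · rw [List.find?_cons_of_neg (p := fun f => PySem.Str.startswith s (f ++ "_") || PySem.Str.startswith s (f ++ "-")) (hfalse "momentum" (by decide) (by decide)),
        List.find?_cons_of_neg (p := fun f => PySem.Str.startswith s (f ++ "_") || PySem.Str.startswith s (f ++ "-")) (hfalse "mean_reversion" (by decide) (by decide)),
        List.find?_cons_of_pos (p := fun f => PySem.Str.startswith s (f ++ "_") || PySem.Str.startswith s (f ++ "-")) ((hpred "defensive_low_vol").mpr hfP)]
      exact (by decide : "defensive_low_vol" = String.ofList "defensive_low_vol".toList)
    · rw [List.find?_cons_of_neg (p := fun f => PySem.Str.startswith s (f ++ "_") || PySem.Str.startswith s (f ++ "-")) (hfalse "momentum" (by decide) (by decide)),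
        List.find?_cons_of_neg (p := fun f => PySem.Str.startswith s (f ++ "_") || PySem.Str.startswith s (f ++ "-")) (hfalse "mean_reversion" (by decide) (by decide)),
        List.find?_cons_of_neg (p := fun f => PySem.Str.startswith s (f ++ "_") || PySem.Str.startswith s (f ++ "-")) (hfalse "defensive_low_vol" (by decide) (by decide)),
        List.find?_cons_of_pos (p := fun f => PySem.Str.startswith s (f ++ "_") || PySem.Str.startswith s (f ++ "-")) ((hpred "value_quality").mpr hfP)]
      exact (by decide : "value_quality" = String.ofList "value_quality".toList)
  · have hex' : ∀ f ∈ pvFamiliesL, ¬ pvPp s.toList f := fun f hf hp => hex ⟨f, hf, hp⟩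
    have hn : ∀ g : String, g.toList ∈ pvFamiliesL →
        ¬ ((PySem.Str.startswith s (g ++ "_") || PySem.Str.startswith s (g ++ "-")) = true) :=
      fun g hg hp => hex' _ hg ((hpred g).mp hp)
    rw [pvScan_none s.toList hex' 0]
    simp only [pvFamilies]
    rw [List.find?_cons_of_neg (p := fun f => PySem.Str.startswith s (f ++ "_") || PySem.Str.startswith s (f ++ "-")) (hn "momentum" (by decide)),
      List.find?_cons_of_neg (p := fun f => PySem.Str.startswith s (f ++ "_") || PySem.Str.startswith s (f ++ "-")) (hn "mean_reversion" (by decide)),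
      List.find?_cons_of_neg (p := fun f => PySem.Str.startswith s (f ++ "_") || PySem.Str.startswith s (f ++ "-")) (hn "defensive_low_vol" (by decide)),
      List.find?_cons_of_neg (p := fun f => PySem.Str.startswith s (f ++ "_") || PySem.Str.startswith s (f ++ "-")) (hn "value_quality" (by decide)),
      List.find?_nil]
    simp

-- ===== VERDICT (by name: the statement is the Claim_ definition above) =====
set_option maxHeartbeats 1000000 in
theorem normalize_strategy_family_name_spec : Claim_equal_normalize_strategy_family_name := by
  intro value _
  unfold Spec_normalize_strategy_family_name
  simp only [normalize_strategy_family_name, normalize_strategy_family_name_alt]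
  by_cases h0 : PySem.Str.lower (PySem.Str.strip (value.getD "")) = ""
  · rw [if_pos h0, if_pos h0]
  · rw [if_neg h0, if_neg h0]
    by_cases h1 : pvFamilies.contains (PySem.Str.lower (PySem.Str.strip (value.getD ""))) = true
    · rw [if_pos h1, if_pos h1]
    · rw [if_neg h1, if_neg h1]
      exact pvCore (PySem.Str.lower (PySem.Str.strip (value.getD "")))
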